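-- pv_equiv track=rewrite | github.com/harshitas144/Hybrid_DNA_Stego | backend/hybrid_dna_qde_steganography.py | xor_dna_sequences
-- ===== SOURCE A (Python) =====
-- def binary_to_dna(binary_str):
--     """Convert binary string to DNA sequence using A, T, G, C"""
--     # Mapping: 00->A, 01->T, 10->G, 11->C
--     dna_map = {'00': 'A', '01': 'T', '10': 'G', '11': 'C'}
--
--     # Pad binary string to make it divisible by 2
--     if len(binary_str) % 2 != 0:
--         binary_str += '0'
--
--     dna_sequence = ''
--     for i in range(0, len(binary_str), 2):
--         pair = binary_str[i:i+2]
--         dna_sequence += dna_map[pair]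
--
--     return dna_sequence
--
-- def dna_to_binary(dna_sequence):
--     """Convert DNA sequence back to binary string"""
--     # Reverse mapping: A->00, T->01, G->10, C->11
--     binary_map = {'A': '00', 'T': '01', 'G': '10', 'C': '11'}
--
--     binary_str = ''
--     for nucleotide in dna_sequence:
--         if nucleotide in binary_map:
--             binary_str += binary_map[nucleotide]
--         else:
--             # Handle invalid characters by treating as 'A'
--             binary_str += '00'
--
--     return binary_str
--
-- def xor_dna_sequences(seq1, seq2):
--     """XOR two DNA sequences by converting to binary"""
--     if len(seq1) != len(seq2):
--         # Pad shorter sequence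
--         max_len = max(len(seq1), len(seq2))
--         seq1 = seq1.ljust(max_len, 'A')
--         seq2 = seq2.ljust(max_len, 'A')
--
--     bin1 = dna_to_binary(seq1)
--     bin2 = dna_to_binary(seq2)
--
--     # XOR the binary representations
--     result_bin = ''
--     for i in range(len(bin1)):
--         bit1 = int(bin1[i])
--         bit2 = int(bin2[i])
--         result_bin += str(bit1 ^ bit2)
--
--     return binary_to_dna(result_bin)
-- ===== SOURCE B (Python) =====
-- def xor_dna_sequences(seq1, seq2):
--     """XOR two DNA sequences nucleotide-by-nucleotide via 2-bit codes."""
--     n = max(len(seq1), len(seq2))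
--     seq1 = seq1.ljust(n, 'A')
--     seq2 = seq2.ljust(n, 'A')
--     val = {'A': 0, 'T': 1, 'G': 2, 'C': 3}
--     inv = 'ATGC'
--     return ''.join(inv[val.get(a, 0) ^ val.get(b, 0)] for a, b in zip(seq1, seq2))
-- ===== Notes on version B (the rewrite author's own statement) =====
-- stated objective: faster
-- what changed: Replaces the three-pass binary-string pipeline (DNA->binary string, per-bit XOR loop with repeated string concatenation, binary->DNA regrouping) by a single zip pass that XORs 2-bit integer codes per nucleotide and joins once, with no intermediate binary representation.
import Mathlib
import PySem

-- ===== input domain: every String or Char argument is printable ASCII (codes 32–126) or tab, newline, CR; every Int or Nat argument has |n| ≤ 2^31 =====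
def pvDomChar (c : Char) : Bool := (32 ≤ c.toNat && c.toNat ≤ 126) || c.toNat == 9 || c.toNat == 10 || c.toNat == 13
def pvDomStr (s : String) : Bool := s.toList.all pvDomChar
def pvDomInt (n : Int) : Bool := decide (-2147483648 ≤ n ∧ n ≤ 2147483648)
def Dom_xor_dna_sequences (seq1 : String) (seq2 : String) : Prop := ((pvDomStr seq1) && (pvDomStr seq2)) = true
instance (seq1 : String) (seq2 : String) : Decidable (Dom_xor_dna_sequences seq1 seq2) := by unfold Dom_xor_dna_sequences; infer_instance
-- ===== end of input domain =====

-- B replaces A's three-pass binary-string pipeline by one zip pass over 2-bit nucleotide codes (objective: simpler).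

-- ===== PORT A =====
-- dna_to_binary's per-nucleotide table: A->"00", T->"01", G->"10", C->"11", anything else treated as 'A' ("00")
def pvBinaryMap (c : Char) : List Char :=
  if c = 'A' then ['0', '0']
  else if c = 'T' then ['0', '1']
  else if c = 'G' then ['1', '0']
  else if c = 'C' then ['1', '1']
  else ['0', '0']

-- dna_to_binary: binary_str accumulated left to right
def pvDnaToBinary (l : List Char) : List Char :=
  l.foldl (fun acc c => acc ++ pvBinaryMap c) []

-- binary_to_dna's pair table (dna_map); inputs are always bit characters here
def pvDnaMap (b1 b2 : Char) : Char :=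
  if b1 = '0' then (if b2 = '0' then 'A' else 'T')
  else (if b2 = '0' then 'G' else 'C')

-- binary_to_dna: the step-2 loop over bit pairs; a trailing lone bit gets the '0' pad A appends
def pvBinaryToDna : List Char → List Char
  | b1 :: b2 :: rest => pvDnaMap b1 b2 :: pvBinaryToDna rest
  | [b1] => [pvDnaMap b1 '0']
  | [] => []

-- int(c) ^ int(c') then str(...) — exact on the bit characters '0'/'1' that reach it
def pvXorBit (c1 c2 : Char) : Char :=
  let b1 : Nat := if c1 = '1' then 1 else 0
  let b2 : Nat := if c2 = '1' then 1 else 0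
  if b1 ^^^ b2 = 1 then '1' else '0'

-- the XOR loop over range(len(bin1)); indices are always in range (equal lengths), default is never read
def pvXorLoop (bin1 bin2 : List Char) : List Char :=
  (List.range bin1.length).foldl
    (fun acc i => acc ++ [pvXorBit (bin1.getD i ' ') (bin2.getD i ' ')]) []

-- str.ljust(n, 'A')
def pvLjust (l : List Char) (n : Nat) : List Char := l ++ List.replicate (n - l.length) 'A'

-- the 'if len(seq1) != len(seq2): pad both with ljust' step
def pvPad (l1 l2 : List Char) : List Char × List Char :=
  if l1.length ≠ l2.length then
    (pvLjust l1 (max l1.length l2.length), pvLjust l2 (max l1.length l2.length))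
  else (l1, l2)

def xor_dna_sequences (seq1 : String) (seq2 : String) : String :=
  String.mk (pvBinaryToDna (pvXorLoop
    (pvDnaToBinary (pvPad seq1.toList seq2.toList).1)
    (pvDnaToBinary (pvPad seq1.toList seq2.toList).2)))

-- ===== PORT B =====
-- val.get(c, 0)
def pvCode (c : Char) : Nat :=
  if c = 'A' then 0 else if c = 'T' then 1 else if c = 'G' then 2 else if c = 'C' then 3 else 0

-- 'ATGC'[v] for v < 4
def pvInv (v : Nat) : Char :=
  if v = 0 then 'A' else if v = 1 then 'T' else if v = 2 then 'G' else 'C'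

def xor_dna_sequences_alt (seq1 : String) (seq2 : String) : String :=
  String.mk (List.zipWith (fun a b => pvInv (pvCode a ^^^ pvCode b))
    (seq1.toList ++ List.replicate (max seq1.toList.length seq2.toList.length - seq1.toList.length) 'A')
    (seq2.toList ++ List.replicate (max seq1.toList.length seq2.toList.length - seq2.toList.length) 'A'))

-- ===== PRECONDITION & SPEC =====
def Spec_xor_dna_sequences (seq1 : String) (seq2 : String) (out : String) : Prop := out = xor_dna_sequences_alt seq1 seq2
instance (seq1 : String) (seq2 : String) (out : String) : Decidable (Spec_xor_dna_sequences seq1 seq2 out) := by unfold Spec_xor_dna_sequences; infer_instance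

-- ===== CLAIM (what is proved, stated in full; the proofs are below) =====
def Claim_equal_xor_dna_sequences : Prop := ∀ (seq1 : String) (seq2 : String), Dom_xor_dna_sequences seq1 seq2 → Spec_xor_dna_sequences seq1 seq2 (xor_dna_sequences seq1 seq2)

-- ===== LEMMAS AND PROOFS =====

-- the two bits of a nucleotide are the binary digits of its 2-bit code
def pvBits (v : Nat) : List Char :=
  if v = 0 then ['0', '0'] else if v = 1 then ['0', '1'] else if v = 2 then ['1', '0'] else ['1', '1']

theorem pvBits_length (v : Nat) : (pvBits v).length = 2 := by
  unfold pvBits; split_ifs <;> rfl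

theorem pvBinaryMap_eq_bits (c : Char) : pvBinaryMap c = pvBits (pvCode c) := by
  unfold pvBinaryMap pvCode pvBits
  split_ifs <;> simp_all

theorem pvCode_lt (c : Char) : pvCode c < 4 := by
  unfold pvCode; split_ifs <;> omega

theorem pvDnaToBinary_eq_flatMap (l : List Char) :
    pvDnaToBinary l = l.flatMap pvBinaryMap := by
  unfold pvDnaToBinary
  simpa using PySem.List.foldl_append_eq_flatMap pvBinaryMap l []

theorem pvXorLoop_eq_zipWith (b1 b2 : List Char) (h : b1.length = b2.length) :
    pvXorLoop b1 b2 = List.zipWith pvXorBit b1 b2 := by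
  unfold pvXorLoop
  rw [PySem.List.foldl_append_singleton_eq_map, List.nil_append]
  apply List.ext_getElem
  · simp [h]
  · intro i h1 h2
    have hi1 : i < b1.length := by simpa using h1
    simp only [List.getElem_map, List.getElem_range, List.getElem_zipWith]
    rw [List.getD_eq_getElem _ _ hi1, List.getD_eq_getElem _ _ (h ▸ hi1)]

theorem pvKey (m n : Nat) (hm : m < 4) (hn : n < 4) (rest : List Char) :
    pvBinaryToDna (List.zipWith pvXorBit (pvBits m) (pvBits n) ++ rest) =
      pvInv (m ^^^ n) :: pvBinaryToDna rest := by
  interval_cases m <;> interval_cases n <;> rfl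

theorem pvMain (l1 : List Char) : ∀ l2 : List Char, l1.length = l2.length →
    pvBinaryToDna (List.zipWith pvXorBit (l1.flatMap pvBinaryMap) (l2.flatMap pvBinaryMap)) =
      List.zipWith (fun a b => pvInv (pvCode a ^^^ pvCode b)) l1 l2 := by
  induction l1 with
  | nil => intro l2 h; rw [List.eq_nil_of_length_eq_zero h.symm]; rfl
  | cons c1 t1 ih =>
    intro l2 h
    cases l2 with
    | nil => simp at h
    | cons c2 t2 =>
      simp only [List.flatMap_cons, List.zipWith_cons_cons]
      rw [pvBinaryMap_eq_bits c1, pvBinaryMap_eq_bits c2,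
        List.zipWith_append (by rw [pvBits_length, pvBits_length]),
        pvKey _ _ (pvCode_lt c1) (pvCode_lt c2), ih t2 (by simpa using h)]

theorem pvPipeline (l1 l2 : List Char) (h : l1.length = l2.length) :
    pvBinaryToDna (pvXorLoop (pvDnaToBinary l1) (pvDnaToBinary l2)) =
      List.zipWith (fun a b => pvInv (pvCode a ^^^ pvCode b)) l1 l2 := by
  have hlen : (l1.flatMap pvBinaryMap).length = (l2.flatMap pvBinaryMap).length := by
    simp only [List.length_flatMap, pvBinaryMap_eq_bits, pvBits_length]
    simp only [List.map_const', List.sum_replicate, h]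
  rw [pvDnaToBinary_eq_flatMap, pvDnaToBinary_eq_flatMap, pvXorLoop_eq_zipWith _ _ hlen]
  exact pvMain l1 l2 h

-- ===== VERDICT (by name: the statement is the Claim_ definition above) =====
theorem xor_dna_sequences_spec : Claim_equal_xor_dna_sequences := by
  intro seq1 seq2 _
  unfold Spec_xor_dna_sequences xor_dna_sequences xor_dna_sequences_alt pvPad
  by_cases hlen : seq1.toList.length = seq2.toList.length
  · rw [if_neg (not_not_intro hlen)]
    rw [pvPipeline _ _ hlen]
    simp [hlen]
  · rw [if_pos hlen]
    rw [pvPipeline _ _ (by unfold pvLjust; simp only [List.length_append, List.length_replicate]; omega)]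
    unfold pvLjust
    rfl
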